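-- pv_equiv track=rewrite | github.com/ShixuanGuo/Tweet_Sentiment_Analysis | 1_Tweet_Perprocessing and EDA.py | identify_class
-- ===== SOURCE A (Python) =====
-- def identify_class(str_list):
--     class_list = []
--     for i in str_list:
--         if i in ["CC","IN"]:
--             class_list.append("conjunction")
--         elif i in ["JJ","JJR","JJS"]:
--             class_list.append("adjective")
--         elif i in ["NN","NNS","NNP","NNPS"]:
--             class_list.append("noun")
--         elif i in ["PRP","PRP$","WP","WP$"]:
--             class_list.append("pronoun")
--         elif i in ["RB","RBR","RBS"]:
--             class_list.append("adverb")
--         elif i in ["VB","VBD","VBG","VBN","VBP","VBZ"]: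
--             class_list.append("verb")
--         elif i == "UH":
--             class_list.append("interjection")
--         else:
--             class_list.append("others")
--     return class_list
-- ===== SOURCE B (Python) =====
-- # Decodes each Penn tag structurally: a class-determining base prefix plus a
-- # validated morphological suffix, instead of chained membership tests.
-- _BASES = [
--     ("CC",  "conjunction",  ("",)),
--     ("IN",  "conjunction",  ("",)),
--     ("JJ",  "adjective",    ("", "R", "S")),
--     ("NN",  "noun",         ("", "S", "P", "PS")),
--     ("PRP", "pronoun",      ("", "$")),
--     ("WP",  "pronoun",      ("", "$")),
--     ("RB",  "adverb",       ("", "R", "S")),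
--     ("VB",  "verb",         ("", "D", "G", "N", "P", "Z")),
--     ("UH",  "interjection", ("",)),
-- ]
--
-- def identify_class(str_list):
--     def classify(tag):
--         for base, cls, suffixes in _BASES:
--             if tag.startswith(base) and tag[len(base):] in suffixes:
--                 return cls
--         return "others"
--     return [classify(t) for t in str_list]
-- ===== Notes on version B (the rewrite author's own statement) =====
-- stated objective: alternative
-- what changed: B classifies each tag by structural decomposition: it scans a small table of class-determining base prefixes and accepts a tag iff it is that prefix followed by one of that class's allowed morphological suffixes, instead of A's ordered if/elif chain of exact-membership tests against hard-coded tag lists.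
import Mathlib
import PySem

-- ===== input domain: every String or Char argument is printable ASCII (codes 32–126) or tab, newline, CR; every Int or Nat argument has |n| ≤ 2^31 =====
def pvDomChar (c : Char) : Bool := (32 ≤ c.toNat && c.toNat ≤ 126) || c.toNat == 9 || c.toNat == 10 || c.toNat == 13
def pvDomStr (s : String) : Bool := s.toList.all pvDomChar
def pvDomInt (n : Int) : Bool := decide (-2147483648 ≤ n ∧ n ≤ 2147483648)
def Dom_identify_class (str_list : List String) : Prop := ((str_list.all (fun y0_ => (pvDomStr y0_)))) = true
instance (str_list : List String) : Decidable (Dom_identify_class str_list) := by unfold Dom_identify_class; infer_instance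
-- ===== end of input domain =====

-- B decodes each tag structurally (class-determining base prefix + validated morphological suffix) instead of A's chained membership tests (objective: alternative).


-- ===== PORT A =====
def identify_class (str_list : List String) : List String :=
  str_list.foldl (fun class_list i =>
    if i = "CC" ∨ i = "IN" then class_list ++ ["conjunction"]
    else if i = "JJ" ∨ i = "JJR" ∨ i = "JJS" then class_list ++ ["adjective"]
    else if i = "NN" ∨ i = "NNS" ∨ i = "NNP" ∨ i = "NNPS" then class_list ++ ["noun"]
    else if i = "PRP" ∨ i = "PRP$" ∨ i = "WP" ∨ i = "WP$" then class_list ++ ["pronoun"]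
    else if i = "RB" ∨ i = "RBR" ∨ i = "RBS" then class_list ++ ["adverb"]
    else if i = "VB" ∨ i = "VBD" ∨ i = "VBG" ∨ i = "VBN" ∨ i = "VBP" ∨ i = "VBZ" then class_list ++ ["verb"]
    else if i = "UH" then class_list ++ ["interjection"]
    else class_list ++ ["others"]) []

-- ===== PORT B =====
-- Source B's _BASES table: (base prefix, class, allowed morphological suffixes)
def pvBases : List (String × String × List String) :=
  [("CC",  "conjunction",  [""]),
   ("IN",  "conjunction",  [""]),
   ("JJ",  "adjective",    ["", "R", "S"]),
   ("NN",  "noun",         ["", "S", "P", "PS"]),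
   ("PRP", "pronoun",      ["", "$"]),
   ("WP",  "pronoun",      ["", "$"]),
   ("RB",  "adverb",       ["", "R", "S"]),
   ("VB",  "verb",         ["", "D", "G", "N", "P", "Z"]),
   ("UH",  "interjection", [""])]

-- Source B's inner 'classify': the for-loop over _BASES
def classifyLoop : List (String × String × List String) → String → String
  | [], _ => "others"
  | (base, cls, sufs) :: rest, tag =>
    if PySem.Str.startswith tag base = true ∧
       PySem.Str.slice tag (some (PySem.Str.len base)) none ∈ sufs then cls
    else classifyLoop rest tag

def identify_class_alt (str_list : List String) : List String :=
  str_list.map (fun t => classifyLoop pvBases t)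

-- ===== PRECONDITION & SPEC =====
def Spec_identify_class (str_list : List String) (out : List String) : Prop := out = identify_class_alt str_list
instance (str_list : List String) (out : List String) : Decidable (Spec_identify_class str_list out) := by unfold Spec_identify_class; infer_instance

-- ===== CLAIM (what is proved, stated in full; the proofs are below) =====
def Claim_equal_identify_class : Prop := ∀ (str_list : List String), Dom_identify_class str_list → Spec_identify_class str_list (identify_class str_list)

-- ===== LEMMAS AND PROOFS =====

-- the loop condition holds iff the tag decomposes as base ++ suffix for some allowed suffix
theorem cond_iff (tag base : String) (sufs : List String) :
    (PySem.Str.startswith tag base = true ∧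
     PySem.Str.slice tag (some (PySem.Str.len base)) none ∈ sufs)
    ↔ ∃ suf ∈ sufs, tag = base ++ suf := by
  constructor
  · rintro ⟨hsw, hmem⟩
    refine ⟨PySem.Str.slice tag (some (PySem.Str.len base)) none, hmem, ?_⟩
    apply String.toList_inj.mp
    have hpre : base.toList <+: tag.toList := by
      rw [← PySem.Chars.startswith_iff]
      simpa [pysem] using hsw
    obtain ⟨r, hr⟩ := hpre
    have hslice : (PySem.Str.slice tag (some (PySem.Str.len base)) none).toList
        = tag.toList.drop base.toList.length := by
      simp [pysem]
    rw [String.toList_append, hslice, ← hr]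
    simp
  · rintro ⟨suf, hmem, rfl⟩
    refine ⟨?_, ?_⟩
    · simp [pysem]
    · have hs : PySem.Str.slice (base ++ suf) (some (PySem.Str.len base)) none = suf := by
        apply String.toList_inj.mp
        simp [pysem]
      rw [hs]; exact hmem

-- pointwise agreement of Source B's classify with A's if/elif chain
set_option maxHeartbeats 2000000 in
theorem classify_pointwise (i : String) :
    classifyLoop pvBases i =
    (if i = "CC" ∨ i = "IN" then "conjunction"
     else if i = "JJ" ∨ i = "JJR" ∨ i = "JJS" then "adjective"
     else if i = "NN" ∨ i = "NNS" ∨ i = "NNP" ∨ i = "NNPS" then "noun"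
     else if i = "PRP" ∨ i = "PRP$" ∨ i = "WP" ∨ i = "WP$" then "pronoun"
     else if i = "RB" ∨ i = "RBR" ∨ i = "RBS" then "adverb"
     else if i = "VB" ∨ i = "VBD" ∨ i = "VBG" ∨ i = "VBN" ∨ i = "VBP" ∨ i = "VBZ" then "verb"
     else if i = "UH" then "interjection"
     else "others") := by
  simp only [pvBases, classifyLoop]
  simp only [cond_iff]
  simp only [List.mem_cons, List.not_mem_nil, or_false, exists_eq_left, exists_eq_or_imp,
    String.append_empty]
  split_ifs <;> simp_all

theorem foldl_append_classify (f : String → String) (xs : List String) (acc : List String) :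
    xs.foldl (fun cl i => cl ++ [f i]) acc = acc ++ xs.map f := by
  induction xs generalizing acc with
  | nil => simp
  | cons x xs ih => simp [List.foldl, ih]

-- ===== VERDICT (by name: the statement is the Claim_ definition above) =====
theorem identify_class_spec : Claim_equal_identify_class := by
  intro str_list _
  show identify_class str_list = identify_class_alt str_list
  unfold identify_class identify_class_alt
  rw [show (fun (class_list : List String) (i : String) =>
    if i = "CC" ∨ i = "IN" then class_list ++ ["conjunction"]
    else if i = "JJ" ∨ i = "JJR" ∨ i = "JJS" then class_list ++ ["adjective"]
    else if i = "NN" ∨ i = "NNS" ∨ i = "NNP" ∨ i = "NNPS" then class_list ++ ["noun"]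
    else if i = "PRP" ∨ i = "PRP$" ∨ i = "WP" ∨ i = "WP$" then class_list ++ ["pronoun"]
    else if i = "RB" ∨ i = "RBR" ∨ i = "RBS" then class_list ++ ["adverb"]
    else if i = "VB" ∨ i = "VBD" ∨ i = "VBG" ∨ i = "VBN" ∨ i = "VBP" ∨ i = "VBZ" then class_list ++ ["verb"]
    else if i = "UH" then class_list ++ ["interjection"]
    else class_list ++ ["others"]) = (fun cl i => cl ++ [classifyLoop pvBases i]) from by
      funext cl i
      rw [classify_pointwise i]
      split_ifs <;> rfl]
  rw [foldl_append_classify (fun i => classifyLoop pvBases i) str_list []]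
  simp
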